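-- pv_equiv track=rewrite | github.com/Spraynard/advent_of_code_2019 | day_10/main.py | map_angle_mapping_to_asteroid_map
-- ===== SOURCE A (Python) =====
-- from collections import deque
--
-- def map_angle_mapping_to_asteroid_map( angle_mapping, asteroid_map ):
--     '''
--     Given an angle mapping array and a full map, insert the given angle mappings over
--     the asteroids in the asteroid.
--
--     Display specific function
--     '''
--     relative_asteroid_angle_queue = deque(angle_mapping)
--     copied_map = [list(row) for row in parse_asteroid_map(asteroid_map)]
--
--     for row_num, row in enumerate(copied_map):
--         for column_num, column in enumerate(row):
--             if column == "#":
--                 copied_map[row_num][column_num] = str(relative_asteroid_angle_queue.popleft())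
--
--     return copied_map
--
-- def parse_asteroid_map(asteroid_map):
--     return [list(row) for row in asteroid_map.split("\n")]
-- ===== SOURCE B (Python) =====
-- def map_angle_mapping_to_asteroid_map(angle_mapping, asteroid_map):
--     '''
--     Overlay angle values on the asteroid cells: split each line on '#' and
--     rebuild the row by interleaving the next angle strings between the
--     non-asteroid segments; no per-cell scan or grid mutation.
--     '''
--     out = []
--     pos = 0
--     for line in asteroid_map.split("\n"):
--         segments = line.split("#")
--         k = len(segments) - 1
--         fills = [str(a) for a in angle_mapping[pos:pos + k]]
--         pos += k
--         cells = list(segments[0])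
--         for fill, seg in zip(fills, segments[1:]):
--             cells.append(fill)
--             cells.extend(seg)
--         out.append(cells)
--     return out
-- ===== Notes on version B (the rewrite author's own statement) =====
-- stated objective: alternative
-- what changed: A parses the map into a grid and scans every cell, popping an angle deque at each '#'; B never tests cells: it splits each line on '#' and rebuilds the row by interleaving the next angle strings between the non-asteroid segments, threading a position into the angle list.
import Mathlib
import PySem

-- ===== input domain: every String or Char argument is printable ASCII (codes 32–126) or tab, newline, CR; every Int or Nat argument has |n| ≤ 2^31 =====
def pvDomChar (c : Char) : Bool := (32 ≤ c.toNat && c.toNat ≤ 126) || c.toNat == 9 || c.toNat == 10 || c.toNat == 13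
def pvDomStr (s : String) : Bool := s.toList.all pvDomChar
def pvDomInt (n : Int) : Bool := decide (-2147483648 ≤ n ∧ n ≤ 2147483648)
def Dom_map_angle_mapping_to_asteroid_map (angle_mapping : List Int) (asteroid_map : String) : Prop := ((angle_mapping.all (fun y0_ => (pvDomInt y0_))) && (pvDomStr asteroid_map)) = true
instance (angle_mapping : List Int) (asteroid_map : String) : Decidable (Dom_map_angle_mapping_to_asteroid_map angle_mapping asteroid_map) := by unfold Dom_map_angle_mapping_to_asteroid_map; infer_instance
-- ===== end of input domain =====

-- B replaces A's per-cell scan (walking every cell of the parsed grid, popping a deque at each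
-- '#') by a split-and-interleave rebuild: each line is split on '#' and the next angle strings
-- are interleaved between the non-asteroid segments (objective: alternative, same cost).

-- ===== PORT A =====
def pvSingle (c : Char) : String := String.ofList [c]

-- parse_asteroid_map: [list(row) for row in asteroid_map.split("\n")]
def pvParseA (s : String) : List (List String) :=
  (PySem.Chars.splitOn s.toList ['\n']).map (fun r => r.map pvSingle)

-- the nested for-loop: walk one row left to right, replacing each '#' by the popped angle;
-- the deque state is threaded through.  On an empty deque Python's popleft raises
-- IndexError — excluded by Pre_; the port keeps the cell there.
def pvFillRowA : List Int → List String → List String × List Int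
  | q, [] => ([], q)
  | q, cell :: rest =>
      if cell == "#" then
        match q with
        | [] => let p := pvFillRowA [] rest; (cell :: p.1, p.2)
        | a :: q' => let p := pvFillRowA q' rest; (PySem.Int.toStr a :: p.1, p.2)
      else
        let p := pvFillRowA q rest; (cell :: p.1, p.2)

def pvFillA : List Int → List (List String) → List (List String)
  | _, [] => []
  | q, row :: rows => let p := pvFillRowA q row; p.1 :: pvFillA p.2 rows

def map_angle_mapping_to_asteroid_map (angle_mapping : List Int) (asteroid_map : String) : List (List String) :=
  pvFillA angle_mapping (pvParseA asteroid_map)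

-- ===== PORT B =====
-- the inner loop: cells = list(segments[0]); for fill, seg in zip(fills, segments[1:]):
--   cells.append(fill); cells.extend(seg)
-- (split never returns an empty list, so segments[0] is ported as headD [])
def pvCellsB (fills : List String) (segments : List (List Char)) : List String :=
  (segments.headD []).map pvSingle ++
    (fills.zip segments.tail).flatMap (fun p => p.1 :: p.2.map pvSingle)

-- the outer loop over asteroid_map.split("\n"), threading pos
def pvGoB (am : List Int) : List (List Char) → Int → List (List String)
  | [], _ => []
  | line :: rest, pos =>
      let segments := PySem.Chars.splitOn line ['#']
      let k : Int := (segments.length : Int) - 1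
      let fills := (PySem.List.slice am (some pos) (some (pos + k))).map PySem.Int.toStr
      pvCellsB fills segments :: pvGoB am rest (pos + k)

def map_angle_mapping_to_asteroid_map_alt (angle_mapping : List Int) (asteroid_map : String) : List (List String) :=
  pvGoB angle_mapping (PySem.Chars.splitOn asteroid_map.toList ['\n']) 0

-- ===== PRECONDITION & SPEC =====
-- Exactly the inputs on which A returns: the map has at most |angle_mapping| '#' cells.
-- With more asteroids than angles A's deque.popleft raises IndexError (B's fills[..] runs short too).
def Pre_map_angle_mapping_to_asteroid_map (angle_mapping : List Int) (asteroid_map : String) : Prop :=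
  ((PySem.Chars.splitOn asteroid_map.toList ['\n']).map (fun r => r.count '#')).sum ≤ angle_mapping.length
instance (angle_mapping : List Int) (asteroid_map : String) : Decidable (Pre_map_angle_mapping_to_asteroid_map angle_mapping asteroid_map) := by unfold Pre_map_angle_mapping_to_asteroid_map; infer_instance
def pvWitness_map_angle_mapping_to_asteroid_map : List Int × String := ([45, -90], "#.\n.#")

def Spec_map_angle_mapping_to_asteroid_map (angle_mapping : List Int) (asteroid_map : String) (out : List (List String)) : Prop := out = map_angle_mapping_to_asteroid_map_alt angle_mapping asteroid_map
instance (angle_mapping : List Int) (asteroid_map : String) (out : List (List String)) : Decidable (Spec_map_angle_mapping_to_asteroid_map angle_mapping asteroid_map out) := by unfold Spec_map_angle_mapping_to_asteroid_map; infer_instance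

-- ===== CLAIM =====
def Claim_equal_map_angle_mapping_to_asteroid_map : Prop := ∀ (angle_mapping : List Int) (asteroid_map : String), Dom_map_angle_mapping_to_asteroid_map angle_mapping asteroid_map → Pre_map_angle_mapping_to_asteroid_map angle_mapping asteroid_map → Spec_map_angle_mapping_to_asteroid_map angle_mapping asteroid_map (map_angle_mapping_to_asteroid_map angle_mapping asteroid_map)

-- ===== LEMMAS AND PROOFS =====

-- structural characterisation of PySem.Chars.splitOn for a one-character separator
def mySplit (ch : Char) : List Char → List (List Char)
  | [] => [[]]
  | c :: cs => if c = ch then [] :: mySplit ch cs else (mySplit ch cs).modifyHead (c :: ·)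

theorem go_char (ch : Char) : ∀ (fuel : Nat) (l cur : List Char) (acc : List (List Char)),
    l.length < fuel →
    PySem.Chars.splitOn.go [ch] fuel l cur acc
      = acc.reverse ++ (mySplit ch l).modifyHead (cur.reverse ++ ·) := by
  intro fuel
  induction fuel with
  | zero => intro l cur acc h; omega
  | succ f ih =>
    intro l cur acc h
    cases l with
    | nil => simp [PySem.Chars.splitOn.go, mySplit]
    | cons c cs =>
      rw [PySem.Chars.splitOn.go]
      by_cases hc : c = ch
      · have hp : List.isPrefixOf [ch] (c :: cs) = true := by simp [List.isPrefixOf, hc]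
        simp only [hp, if_pos]
        rw [ih _ _ _ (by simp at h ⊢; omega)]
        cases hms : mySplit ch cs with
        | nil => simp [mySplit, hc, hms, List.modifyHead]
        | cons s0 rest => simp [mySplit, hc, hms, List.modifyHead]
      · have hp : List.isPrefixOf [ch] (c :: cs) = false := by
          simp [List.isPrefixOf]; exact fun hh => (hc hh.symm)
        simp only [hp, Bool.false_eq_true, if_false]
        rw [ih _ _ _ (by simp at h ⊢; omega)]
        cases hms : mySplit ch cs with
        | nil => simp [mySplit, hc, hms, List.modifyHead]
        | cons s0 rest => simp [mySplit, hc, hms, List.modifyHead]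

theorem splitOn_char (ch : Char) (l : List Char) : PySem.Chars.splitOn l [ch] = mySplit ch l := by
  rw [PySem.Chars.splitOn, go_char ch _ _ _ _ (by omega)]
  cases hms : mySplit ch l with
  | nil => simp [List.modifyHead]
  | cons s0 rest => simp [List.modifyHead]

theorem mySplit_ne_nil (ch : Char) (l : List Char) : mySplit ch l ≠ [] := by
  cases l with
  | nil => simp [mySplit]
  | cons c cs =>
    by_cases hc : c = ch
    · simp [mySplit, hc]
    · simp only [mySplit, hc, if_false]
      cases hms : mySplit ch cs with
      | nil => exact absurd hms (mySplit_ne_nil ch cs)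
      | cons s0 rest => simp [List.modifyHead]

theorem mySplit_length (l : List Char) : (mySplit '#' l).length = l.count '#' + 1 := by
  induction l with
  | nil => simp [mySplit]
  | cons c cs ih =>
    by_cases hc : c = '#'
    · simp [mySplit, hc, ih]
    · have hb : (c == '#') = false := by simp [hc]
      simp [mySplit, hc, List.length_modifyHead, ih]

theorem pvStrOfListBeq (c : Char) : (pvSingle c == "#") = (c == '#') := by
  rcases h : c == '#' with _ | _ <;> simp_all [pvSingle]
  intro hs
  have := congrArg String.toList hs
  simp at this
  exact h this

theorem pvCellsB_hash (f : String) (fs : List String) (segs : List (List Char)) (h : segs ≠ []) :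
    pvCellsB (f :: fs) ([] :: segs) = f :: pvCellsB fs segs := by
  cases segs with
  | nil => exact absurd rfl h
  | cons s0 rest => simp [pvCellsB]

theorem pvCellsB_char (c : Char) (fs : List String) (segs : List (List Char)) (h : segs ≠ []) :
    pvCellsB fs (segs.modifyHead (c :: ·)) = pvSingle c :: pvCellsB fs segs := by
  cases segs with
  | nil => exact absurd rfl h
  | cons s0 rest => simp [pvCellsB, List.modifyHead]

-- one row: A's left-to-right fill equals B's split-and-interleave rebuild
theorem pvRow_eq (line : List Char) : ∀ (q : List Int), line.count '#' ≤ q.length →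
    pvFillRowA q (line.map pvSingle)
      = (pvCellsB ((q.take (line.count '#')).map PySem.Int.toStr) (mySplit '#' line),
         q.drop (line.count '#')) := by
  induction line with
  | nil => intro q _; simp [pvFillRowA, mySplit, pvCellsB]
  | cons c cs ih =>
    intro q hq
    by_cases hc : c = '#'
    · have hcnt : (c :: cs).count '#' = cs.count '#' + 1 := by simp [hc]
      rw [hcnt] at hq
      cases q with
      | nil => simp at hq
      | cons a q' =>
        have hq' : cs.count '#' ≤ q'.length := by simp at hq; omega
        have hbeq : (pvSingle c == "#") = true := by rw [pvStrOfListBeq]; simp [hc]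
        simp only [List.map_cons, pvFillRowA, hbeq, if_pos, ih q' hq']
        rw [hcnt]
        simp only [List.take_succ_cons, List.map_cons, List.drop_succ_cons]
        rw [mySplit]
        simp only [hc, if_pos]
        rw [pvCellsB_hash _ _ _ (mySplit_ne_nil '#' cs)]
    · have hcnt : (c :: cs).count '#' = cs.count '#' := by
        simp [List.count_cons]
        intro h; exact absurd h hc
      rw [hcnt] at hq
      have hbeq : (pvSingle c == "#") = false := by rw [pvStrOfListBeq]; simp [hc]
      simp only [List.map_cons, pvFillRowA, hbeq, Bool.false_eq_true, if_false, ih q hq]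
      rw [hcnt, mySplit]
      simp only [hc, if_false]
      rw [pvCellsB_char _ _ _ (mySplit_ne_nil '#' cs)]

-- the whole map: B's pos-threaded loop equals A's queue-threaded fill
theorem pvMain (am : List Int) (lines : List (List Char)) : ∀ (n : Nat),
    n + ((lines.map (fun l => l.count '#')).sum) ≤ am.length →
    pvGoB am lines (n : Int) = pvFillA (am.drop n) (lines.map (fun l => l.map pvSingle)) := by
  induction lines with
  | nil => intro n _; simp [pvGoB, pvFillA]
  | cons line rest ih =>
    intro n h
    have hk : line.count '#' ≤ (am.drop n).length := by
      simp at h ⊢; omega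
    rw [List.map_cons, pvGoB, pvFillA, pvRow_eq line (am.drop n) hk]
    simp only
    congr 1
    · -- the row
      rw [splitOn_char, mySplit_length]
      have hkint : ((line.count '#' + 1 : Nat) : Int) - 1 = ((line.count '#' : Nat) : Int) := by
        push_cast; ring
      rw [hkint, PySem.List.slice_natCast_add]
    · -- the tail: drop and recurse
      rw [List.drop_drop] at *
      rw [splitOn_char, mySplit_length]
      have hkint : ((n : Nat) : Int) + (((line.count '#' + 1 : Nat) : Int) - 1)
          = (((line.count '#' + n : Nat)) : Int) := by push_cast; ring
      rw [hkint, ih (line.count '#' + n) (by simp at h ⊢; omega), Nat.add_comm]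

-- ===== VERDICT =====
theorem map_angle_mapping_to_asteroid_map_spec : Claim_equal_map_angle_mapping_to_asteroid_map := by
  intro am m _hdom hpre
  unfold Spec_map_angle_mapping_to_asteroid_map
  unfold map_angle_mapping_to_asteroid_map map_angle_mapping_to_asteroid_map_alt
  unfold Pre_map_angle_mapping_to_asteroid_map at hpre
  have := pvMain am (PySem.Chars.splitOn m.toList ['\n']) 0 (by simpa using hpre)
  unfold pvParseA
  simpa using this.symm
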